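-- pv_equiv track=rewrite | github.com/serre-ai/research | scripts/compass/report.py | _section_signal_breakdown
-- ===== SOURCE A (Python) =====
-- from collections import defaultdict
--
-- def _section_signal_breakdown(signals: list[dict]) -> str:
--     """Render the Signal Breakdown table."""
--     if not signals:
--         return "No signals to summarize.\n"
--
--     # Group by detector
--     by_detector: dict[str, list[dict]] = defaultdict(list)
--     for sig in signals:
--         det = sig.get("detector", "unknown")
--         by_detector[det].append(sig)
--
--     lines: list[str] = [
--         "| Detector | Signals | Top Type |",
--         "|----------|---------|----------|",
--     ]
--
--     for det in sorted(by_detector.keys()):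
--         sigs = by_detector[det]
--         count = len(sigs)
--         # Find most common signal_type
--         type_counts: dict[str, int] = defaultdict(int)
--         for s in sigs:
--             type_counts[s.get("signal_type", "unknown")] += 1
--         top_type = max(type_counts, key=type_counts.get)  # type: ignore[arg-type]
--         top_count = type_counts[top_type]
--         lines.append(f"| {det} | {count} | {top_type} ({top_count}) |")
--
--     return "\n".join(lines) + "\n"
-- ===== SOURCE B (Python) =====
-- def _section_signal_breakdown(signals: list[dict]) -> str:
--     """Render the Signal Breakdown table (single pass: per-detector running
--     count and type counter, never storing the signal dicts)."""
--     if not signals: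
--         return "No signals to summarize.\n"
--
--     stats: dict[str, tuple[int, dict[str, int]]] = {}
--     for sig in signals:
--         det = sig.get("detector", "unknown")
--         typ = sig.get("signal_type", "unknown")
--         if det in stats:
--             cnt, tc = stats[det]
--         else:
--             cnt, tc = 0, {}
--         tc[typ] = tc.get(typ, 0) + 1
--         stats[det] = (cnt + 1, tc)
--
--     rows = [
--         "| Detector | Signals | Top Type |",
--         "|----------|---------|----------|",
--     ]
--     for det in sorted(stats):
--         cnt, tc = stats[det]
--         top = max(tc, key=tc.get)
--         rows.append(f"| {det} | {cnt} | {top} ({tc[top]}) |")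
--     return "\n".join(rows) + "\n"
-- ===== Notes on version B (the rewrite author's own statement) =====
-- stated objective: simpler
-- what changed: One pass over signals keeps only a running count and a per-type counter per detector (no grouping of the signal dicts themselves and no second counting loop over each group); rendering then reads the precomputed stats.
import Mathlib
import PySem

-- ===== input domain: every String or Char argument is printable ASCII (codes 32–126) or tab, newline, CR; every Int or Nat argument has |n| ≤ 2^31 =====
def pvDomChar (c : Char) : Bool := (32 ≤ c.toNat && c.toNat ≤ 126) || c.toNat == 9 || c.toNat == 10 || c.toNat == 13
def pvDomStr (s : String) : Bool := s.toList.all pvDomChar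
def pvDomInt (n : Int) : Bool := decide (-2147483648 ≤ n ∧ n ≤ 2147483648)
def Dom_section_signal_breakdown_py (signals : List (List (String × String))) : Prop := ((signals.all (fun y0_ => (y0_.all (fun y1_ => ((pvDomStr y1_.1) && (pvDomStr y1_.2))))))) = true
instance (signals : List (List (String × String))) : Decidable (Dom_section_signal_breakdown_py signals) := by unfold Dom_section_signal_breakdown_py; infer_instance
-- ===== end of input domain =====

-- B replaces A's group-then-recount structure (store every signal dict per detector, then a
-- second counting loop per group) by a single pass keeping only a running count and a per-type
-- counter per detector; objective: simpler bookkeeping, same rendered table.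

-- ===== PORT A =====
-- sig.get(k, "unknown") : first-match association-list lookup (Python dict.get)
def sbGet (sig : List (String × String)) (k : String) : String :=
  (PySem.Dict.mk sig).getD k "unknown"

def section_signal_breakdown_py (signals : List (List (String × String))) : String :=
  if signals = [] then "No signals to summarize.\n" else
  let byDet : PySem.Dict String (List (List (String × String))) :=
    signals.foldl (fun d sig => d.modify (sbGet sig "detector") [] (· ++ [sig]))
      PySem.Dict.empty
  let lines : List String :=
    ["| Detector | Signals | Top Type |", "|----------|---------|----------|"]
  let lines := (PySem.List.sorted byDet.keys (fun k => k) false).foldl (fun lines det =>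
      let sigs := byDet.getD det []
      let count : Int := sigs.length
      let typeCounts : PySem.Dict String Int :=
        sigs.foldl (fun d s => d.modify (sbGet s "signal_type") 0 (· + 1)) PySem.Dict.empty
      -- max(type_counts, key=type_counts.get): keys iterated in insertion order; every key is
      -- present, so .get is .getD _ 0 here; the "" default is unreachable (type_counts ≠ {}).
      let topType := PySem.List.maxD typeCounts.keys (fun t => typeCounts.getD t 0) ""
      let topCount := typeCounts.getD topType 0
      lines ++ ["| " ++ det ++ " | " ++ PySem.Int.toStr count ++ " | " ++ topType ++
        " (" ++ PySem.Int.toStr topCount ++ ") |"]) lines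
  PySem.Str.join "\n" lines ++ "\n"

-- ===== PORT B =====
def section_signal_breakdown_py_alt (signals : List (List (String × String))) : String :=
  if signals = [] then "No signals to summarize.\n" else
  let stats : PySem.Dict String (Int × PySem.Dict String Int) :=
    signals.foldl (fun st sig =>
      let e := st.getD (sbGet sig "detector") (0, PySem.Dict.empty)
      st.insert (sbGet sig "detector") (e.1 + 1, e.2.modify (sbGet sig "signal_type") 0 (· + 1)))
      PySem.Dict.empty
  let rows : List String :=
    ["| Detector | Signals | Top Type |", "|----------|---------|----------|"]
  let rows := (PySem.List.sorted stats.keys (fun k => k) false).foldl (fun rows det =>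
      let e := stats.getD det (0, PySem.Dict.empty)
      let top := PySem.List.maxD e.2.keys (fun t => e.2.getD t 0) ""
      rows ++ ["| " ++ det ++ " | " ++ PySem.Int.toStr e.1 ++ " | " ++ top ++
        " (" ++ PySem.Int.toStr (e.2.getD top 0) ++ ") |"]) rows
  PySem.Str.join "\n" rows ++ "\n"

-- ===== PRECONDITION & SPEC =====
def Spec_section_signal_breakdown_py (signals : List (List (String × String))) (out : String) : Prop := out = section_signal_breakdown_py_alt signals
instance (signals : List (List (String × String))) (out : String) : Decidable (Spec_section_signal_breakdown_py signals out) := by unfold Spec_section_signal_breakdown_py; infer_instance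

-- ===== CLAIM (what is proved, stated in full; the proofs are below) =====
def Claim_equal_section_signal_breakdown_py : Prop := ∀ (signals : List (List (String × String))), Dom_section_signal_breakdown_py signals → Spec_section_signal_breakdown_py signals (section_signal_breakdown_py signals)

-- ===== LEMMAS AND PROOFS =====

-- A's grouping dict, looked up at any detector, is the filtered signal list.
theorem sb_byDet_getD (signals : List (List (String × String))) (det : String) :
    (signals.foldl (fun d sig => d.modify (sbGet sig "detector") [] (· ++ [sig]))
      (PySem.Dict.empty : PySem.Dict String (List (List (String × String))))).getD det []
    = signals.filter (fun s => sbGet s "detector" == det) := by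
  have h := PySem.Dict.getD_foldl_modify_append
    (signals.map (fun s => (sbGet s "detector", s)))
    (PySem.Dict.empty : PySem.Dict String (List (List (String × String)))) det
  rw [List.foldl_map, List.filter_map] at h
  simpa [Function.comp_def] using h

-- B's stats dict, looked up at any detector, is (filtered length, type counter of the filtered list).
theorem sb_stats_getD (signals : List (List (String × String)))
    (st : PySem.Dict String (Int × PySem.Dict String Int)) (det : String) :
    (signals.foldl (fun st sig =>
      let e := st.getD (sbGet sig "detector") (0, PySem.Dict.empty)
      st.insert (sbGet sig "detector") (e.1 + 1, e.2.modify (sbGet sig "signal_type") 0 (· + 1)))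
      st).getD det (0, PySem.Dict.empty)
    = ((st.getD det (0, PySem.Dict.empty)).1
        + ((signals.filter (fun s => sbGet s "detector" == det)).length : Int),
       ((signals.filter (fun s => sbGet s "detector" == det)).map (fun s => sbGet s "signal_type")).foldl
         (fun d t => d.modify t 0 (· + 1)) (st.getD det (0, PySem.Dict.empty)).2) := by
  induction signals generalizing st with
  | nil => simp
  | cons s l ih =>
    simp only [List.foldl_cons, List.filter_cons]
    by_cases h : sbGet s "detector" = det
    · subst h
      simp only [beq_self_eq_true, if_pos]
      rw [ih]
      simp only [PySem.Dict.getD_insert, if_pos]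
      simp only [List.length_cons, List.map_cons, List.foldl_cons, Prod.mk.injEq]
      exact ⟨by push_cast; ring, by simp⟩
    · have hb : (sbGet s "detector" == det) = false := by simpa using h
      simp only [hb, Bool.false_eq_true, if_false]
      rw [ih]
      rw [PySem.Dict.getD_insert]
      simp [Ne.symm h]

theorem section_signal_breakdown_eq (signals : List (List (String × String))) :
    section_signal_breakdown_py signals = section_signal_breakdown_py_alt signals := by
  unfold section_signal_breakdown_py section_signal_breakdown_py_alt
  by_cases hnil : signals = []
  · simp [hnil]
  · simp only [hnil, if_false]
    -- the two dicts have the same key list, hence the same sorted detector order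
    have hkeysA :
        (signals.foldl (fun d sig => d.modify (sbGet sig "detector") [] (· ++ [sig]))
          (PySem.Dict.empty : PySem.Dict String (List (List (String × String))))).keys
        = PySem.Set.update ([] : PySem.Set String) (signals.map (fun s => sbGet s "detector")) := by
      rw [PySem.Dict.keys_foldl_modify_key signals (fun s => sbGet s "detector") []
        (fun _ sig => (· ++ [sig])), PySem.Dict.keys_empty]
    have hkeysB :
        (signals.foldl (fun st sig =>
          let e := st.getD (sbGet sig "detector") (0, PySem.Dict.empty)
          st.insert (sbGet sig "detector") (e.1 + 1, e.2.modify (sbGet sig "signal_type") 0 (· + 1)))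
          (PySem.Dict.empty : PySem.Dict String (Int × PySem.Dict String Int))).keys
        = PySem.Set.update ([] : PySem.Set String) (signals.map (fun s => sbGet s "detector")) := by
      rw [PySem.Dict.keys_foldl_insert_key signals (fun s => sbGet s "detector")
        (fun st sig =>
          ((st.getD (sbGet sig "detector") (0, PySem.Dict.empty)).1 + 1,
           (st.getD (sbGet sig "detector") (0, PySem.Dict.empty)).2.modify
             (sbGet sig "signal_type") 0 (· + 1))), PySem.Dict.keys_empty]
    rw [hkeysA, hkeysB]
    rw [PySem.List.foldl_append_singleton_eq_map, PySem.List.foldl_append_singleton_eq_map]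
    refine congrArg (fun l => PySem.Str.join "\n"
      (["| Detector | Signals | Top Type |", "|----------|---------|----------|"] ++ l) ++ "\n") ?_
    apply List.map_congr_left
    intro det _
    have hA := sb_byDet_getD signals det
    have hB := sb_stats_getD signals PySem.Dict.empty det
    simp only [PySem.Dict.getD_empty] at hB
    rw [hA, hB]
    rw [List.foldl_map]
    simp

-- ===== VERDICT (by name: the statement is the Claim_ definition above) =====
theorem section_signal_breakdown_py_spec : Claim_equal_section_signal_breakdown_py := by
  intro signals _
  unfold Spec_section_signal_breakdown_py
  exact section_signal_breakdown_eq signals
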